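-- pv_equiv track=rewrite | github.com/lucasalme1da/codesignal | The Core/11 - extraNumber.py | extraNumber
-- ===== SOURCE A (Python) =====
-- def extraNumber(a, b, c):
--     l = [a, b, c]
--     for i in range(3):
--         aux = l[i]
--         l.remove(aux)
--         if aux not in l:
--             return aux
--         l.insert(i, aux)
-- ===== SOURCE B (Python) =====
-- def extraNumber(a, b, c):
--     l = [a, b, c]
--     for x in l:
--         if l.count(x) == 1:
--             return x
-- ===== Notes on version B (the rewrite author's own statement) =====
-- stated objective: simpler
-- what changed: Replaces A's remove/re-insert probing against a mutated list by a single pass returning the first value whose occurrence count in [a, b, c] is 1.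
-- outside the precondition, e.g. on extraNumber(5, 5, 5): A returns None, B returns None
import Mathlib
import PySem

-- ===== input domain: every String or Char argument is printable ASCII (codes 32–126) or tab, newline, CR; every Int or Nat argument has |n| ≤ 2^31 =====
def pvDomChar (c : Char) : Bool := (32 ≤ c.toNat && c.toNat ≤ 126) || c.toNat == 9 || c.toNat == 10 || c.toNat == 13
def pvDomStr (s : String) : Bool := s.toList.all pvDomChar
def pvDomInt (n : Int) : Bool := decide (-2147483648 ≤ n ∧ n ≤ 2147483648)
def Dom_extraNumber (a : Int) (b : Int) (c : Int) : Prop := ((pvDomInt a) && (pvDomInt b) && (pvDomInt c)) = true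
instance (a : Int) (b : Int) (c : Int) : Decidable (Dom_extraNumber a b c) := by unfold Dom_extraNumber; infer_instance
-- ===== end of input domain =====

-- B replaces A's remove/re-insert probing loop with a single pass returning the
-- first value whose occurrence count in [a, b, c] is 1 (objective: simpler).


-- ===== PORT A =====
-- loop 'for i in range(3)' over the mutated list l; none = fell off the end (Python None)
def extraNumberLoop (l : List Int) : List Int → Option Int
  | [] => none
  | i :: is =>
    match PySem.List.pyGet? l i with
    | none => none
    | some aux =>
      match PySem.List.remove? l aux with
      | none => none
      | some l' =>
        if aux ∈ l' then extraNumberLoop (PySem.List.insert l' i aux) is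
        else some aux

def extraNumber (a : Int) (b : Int) (c : Int) : Int :=
  (extraNumberLoop [a, b, c] (PySem.List.pyRange 0 3 1)).getD 0

-- ===== PORT B =====
-- 'for x in l: if l.count(x) == 1: return x'; none = fell off the end (Python None)
def extraNumberAltLoop (l : List Int) : List Int → Option Int
  | [] => none
  | x :: xs => if PySem.List.count l x = 1 then some x else extraNumberAltLoop l xs

def extraNumber_alt (a : Int) (b : Int) (c : Int) : Int :=
  (extraNumberAltLoop [a, b, c] [a, b, c]).getD 0

-- ===== PRECONDITION & SPEC =====
-- Pre_ excludes a = b = c, where the Python A falls off the loop and returns None, not an int.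
def Pre_extraNumber (a : Int) (b : Int) (c : Int) : Prop := ¬ (a = b ∧ b = c)
instance (a : Int) (b : Int) (c : Int) : Decidable (Pre_extraNumber a b c) := by unfold Pre_extraNumber; infer_instance
def pvWitness_extraNumber : Int × Int × Int := (1, 2, 2)

def Spec_extraNumber (a : Int) (b : Int) (c : Int) (out : Int) : Prop := out = extraNumber_alt a b c
instance (a : Int) (b : Int) (c : Int) (out : Int) : Decidable (Spec_extraNumber a b c out) := by unfold Spec_extraNumber; infer_instance

-- ===== CLAIM (what is proved, stated in full; the proofs are below) =====
def Claim_equal_extraNumber : Prop := ∀ (a : Int) (b : Int) (c : Int), Dom_extraNumber a b c → Pre_extraNumber a b c → Spec_extraNumber a b c (extraNumber a b c)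

-- ===== LEMMAS AND PROOFS =====

-- ===== VERDICT (by name: the statement is the Claim_ definition above) =====
theorem extraNumber_spec : Claim_equal_extraNumber := by
  intro a b c _ hpre
  unfold Spec_extraNumber extraNumber extraNumber_alt
  have hr : PySem.List.pyRange 0 3 1 = [0, 1, 2] := by decide
  rw [hr]
  by_cases hab : a = b <;> by_cases hac : a = c <;> by_cases hbc : b = c <;>
    simp_all [extraNumberLoop, extraNumberAltLoop, PySem.List.pyGet?,
      PySem.List.pyIdx?, PySem.List.remove?_cons_of_ne, PySem.List.insert,
      PySem.List.sliceIndices, PySem.List.count, Pre_extraNumber, List.count_cons] <;>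
    simp_all [eq_comm]
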